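-- pv_equiv track=rewrite | github.com/avast/wanna-ml | src/wanna/cli/plugins/job_plugin.py | _extract_job_overrides
-- ===== SOURCE A (Python) =====
-- from typing import List, Tuple, Union
--
-- def _extract_job_overrides(
--     extra_args: List[str],
-- ) -> Tuple[List[Union[str, float, int]], List[str]]:
--     args: List[Union[str, float, int]] = []
--     command = []
--     for extra_arg in extra_args:
--         if extra_arg.startswith("--") or args:
--             args.append(extra_arg)
--         else:
--             command.append(extra_arg)
--
--     return args, command
-- ===== SOURCE B (Python) =====
-- from typing import List, Tuple, Union
--
-- def _extract_job_overrides(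
--     extra_args: List[str],
-- ) -> Tuple[List[Union[str, float, int]], List[str]]:
--     split = next((i for i, a in enumerate(extra_args) if a.startswith("--")), len(extra_args))
--     return extra_args[split:], extra_args[:split]
-- ===== Notes on version B (the rewrite author's own statement) =====
-- stated objective: simpler
-- what changed: Instead of a per-element loop maintaining an args-seen flag via two accumulators, B computes the index of the first '--' argument once and returns the two slices around that boundary.
import Mathlib
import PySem

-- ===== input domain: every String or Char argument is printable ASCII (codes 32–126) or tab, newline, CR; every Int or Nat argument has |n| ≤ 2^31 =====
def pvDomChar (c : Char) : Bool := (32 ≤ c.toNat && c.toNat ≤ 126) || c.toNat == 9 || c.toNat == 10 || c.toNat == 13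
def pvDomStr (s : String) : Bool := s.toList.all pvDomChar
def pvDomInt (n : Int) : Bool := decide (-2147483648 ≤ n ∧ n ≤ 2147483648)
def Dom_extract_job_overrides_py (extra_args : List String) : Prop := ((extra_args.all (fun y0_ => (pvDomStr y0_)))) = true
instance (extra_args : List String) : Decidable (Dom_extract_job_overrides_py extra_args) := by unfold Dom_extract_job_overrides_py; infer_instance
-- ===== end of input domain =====

-- B replaces A's flag-carrying accumulator loop with one boundary index and two slices (simpler decomposition, same O(n)).
-- ===== PORT A =====
-- loop body: if extra_arg.startswith("--") or args: args.append(...) else: command.append(...)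
def pvStepA (st : List String × List String) (extra_arg : String) : List String × List String :=
  if PySem.Str.startswith extra_arg "--" || !st.1.isEmpty then (st.1 ++ [extra_arg], st.2)
  else (st.1, st.2 ++ [extra_arg])

def extract_job_overrides_py (extra_args : List String) : List String × List String :=
  extra_args.foldl pvStepA ([], [])

-- ===== PORT B =====
-- split = next((i for i, a in enumerate(extra_args) if a.startswith("--")), len(extra_args));
-- findIdx returns the length when no element matches, exactly the generator's default.
-- slices with this nonnegative in-range index are drop/take.
def extract_job_overrides_py_alt (extra_args : List String) : List String × List String :=
  let split := extra_args.findIdx (fun a => PySem.Str.startswith a "--")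
  (extra_args.drop split, extra_args.take split)

-- ===== PRECONDITION & SPEC =====
def Spec_extract_job_overrides_py (extra_args : List String) (out : List String × List String) : Prop := out = extract_job_overrides_py_alt extra_args
instance (extra_args : List String) (out : List String × List String) : Decidable (Spec_extract_job_overrides_py extra_args out) := by unfold Spec_extract_job_overrides_py; infer_instance

-- ===== CLAIM (what is proved, stated in full; the proofs are below) =====
def Claim_equal_extract_job_overrides_py : Prop := ∀ (extra_args : List String), Dom_extract_job_overrides_py extra_args → Spec_extract_job_overrides_py extra_args (extract_job_overrides_py extra_args)

-- ===== LEMMAS AND PROOFS =====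

-- ===== VERDICT (by name: the statement is the Claim_ definition above) =====
-- once args is nonempty, every remaining element is appended to args
theorem pvStepA_absorb (xs : List String) (args cmd : List String) (h : args ≠ []) :
    xs.foldl pvStepA (args, cmd) = (args ++ xs, cmd) := by
  induction xs generalizing args with
  | nil => simp
  | cons x xs ih =>
      simp only [List.foldl_cons, pvStepA]
      rw [if_pos (by simp [h])]
      rw [ih (args ++ [x]) (by simp)]
      simp

theorem pvFold_eq (xs : List String) (cmd : List String) :
    xs.foldl pvStepA ([], cmd) =
      (xs.drop (xs.findIdx (fun a => PySem.Str.startswith a "--")),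
       cmd ++ xs.take (xs.findIdx (fun a => PySem.Str.startswith a "--"))) := by
  induction xs generalizing cmd with
  | nil => simp
  | cons x xs ih =>
      by_cases hx : PySem.Str.startswith x "--"
      · simp only [List.foldl_cons, pvStepA, hx, List.findIdx_cons, cond_true,
          Bool.true_or, if_pos]
        simpa using pvStepA_absorb xs [x] cmd (by simp)
      · have hx' : PySem.Chars.startswith x.toList ['-', '-'] = false := by
          simpa using hx
        rw [List.foldl_cons, show pvStepA ([], cmd) x = ([], cmd ++ [x]) from by
            simp [pvStepA, hx'], ih]
        simp [List.findIdx_cons, hx']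

theorem extract_job_overrides_py_spec : Claim_equal_extract_job_overrides_py := by
  intro xs _
  unfold Spec_extract_job_overrides_py extract_job_overrides_py extract_job_overrides_py_alt
  simpa using pvFold_eq xs []
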